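-- pv_equiv track=rewrite | github.com/neuezeldaa/Algorithms_CodeRun | CodeRun Winter Challenge/8.py | precompute_k_interesting
-- ===== SOURCE A (Python) =====
-- def precompute_k_interesting(max_n, max_k):
--     k_interesting = [[] for _ in range(max_k + 1)]
--
--     k_interesting[1] = list(range(2, max_n + 1))
--
--     def generate(product, k_needed, min_factor, result_set):
--         if k_needed == 0:
--             result_set.add(product)
--             return
--
--         min_remaining_product = 1
--         for i in range(k_needed):
--             min_remaining_product *= (min_factor + i)
--             if product * min_remaining_product > max_n:
--                 return
--
--         max_factor = max_n // product
--
--         for factor in range(min_factor, max_factor + 1):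
--             new_product = product * factor
--             if new_product > max_n:
--                 break
--             generate(new_product, k_needed - 1, factor + 1, result_set)
--
--     for k in range(2, max_k + 1):
--         min_val = 1
--         for i in range(k):
--             min_val *= (2 + i)
--
--         if min_val > max_n:
--             break
--
--         result_set = set()
--         generate(1, k, 2, result_set)
--         k_interesting[k] = sorted(result_set)
--
--     return k_interesting
-- ===== SOURCE B (Python) =====
-- def precompute_k_interesting(max_n, max_k):
--     res = [[] for _ in range(max_k + 1)]
--     res[1] = list(range(2, max_n + 1))
--
--     # layered expansion over states (product, next_min_factor)
--     frontier = [(f, f + 1) for f in range(2, max_n + 1)]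
--     for k in range(2, max_k + 1):
--         next_frontier = []
--         for p, mf in frontier:
--             for f in range(mf, max_n // p + 1):
--                 next_frontier.append((p * f, f + 1))
--         if not next_frontier:
--             break
--         frontier = next_frontier
--         res[k] = sorted(set(p for p, _ in frontier))
--     return res
-- ===== Notes on version B (the rewrite author's own statement) =====
-- stated objective: alternative
-- what changed: Replaced the per-k recursive backtracking generator (with factorial lower-bound pruning and per-k restarts from product 1) by a single iterative layered breadth-first expansion over (product, next_min_factor) states: one frontier is expanded level by level, each level's products are deduplicated and sorted into the k-th slot, stopping when the frontier dies out.
import Mathlib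
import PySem

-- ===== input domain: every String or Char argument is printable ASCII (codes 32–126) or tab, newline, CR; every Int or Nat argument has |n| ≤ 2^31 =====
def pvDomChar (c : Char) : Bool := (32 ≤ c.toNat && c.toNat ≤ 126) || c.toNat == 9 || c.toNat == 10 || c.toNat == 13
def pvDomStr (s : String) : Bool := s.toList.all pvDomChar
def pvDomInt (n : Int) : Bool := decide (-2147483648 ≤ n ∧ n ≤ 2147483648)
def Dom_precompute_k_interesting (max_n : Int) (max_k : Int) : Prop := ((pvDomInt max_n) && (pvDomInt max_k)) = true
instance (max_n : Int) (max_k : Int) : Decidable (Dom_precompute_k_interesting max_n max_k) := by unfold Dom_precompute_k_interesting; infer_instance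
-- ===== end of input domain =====

-- B replaces A's per-k recursive backtracking (restarted from product 1 for every k) by one
-- iterative layered expansion of (product, next_min_factor) states; same results (objective: alternative).

-- ===== PORT A =====
-- min_val / min_remaining_product loop "for i in range(k): acc *= (c+i)", no early exit
def aMinVal : Nat → Int → Int → Int
  | 0, _, acc => acc
  | k+1, c, acc => aMinVal k (c + 1) (acc * c)

-- the early-return prefix check inside generate: "mrp *= (min_factor+i); if product*mrp > max_n: return"
def aMinChk (N product : Int) : Nat → Int → Int → Bool
  | 0, _, _ => false
  | k+1, c, mrp =>
    if N < product * (mrp * c) then true else aMinChk N product k (c + 1) (mrp * c)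

mutual
-- generate(product, k_needed, min_factor, result_set)
def agen (N : Int) : Nat → Int → Int → PySem.Set Int → PySem.Set Int
  | 0, product, _, s => PySem.Set.add s product
  | k+1, product, minf, s =>
    if aMinChk N product (k+1) minf 1 then s
    else aForLoop N k product (PySem.List.pyRange minf (PySem.Int.floordiv N product + 1) 1) s
  termination_by k => (k, 0)

-- "for factor in range(min_factor, max_factor+1): … if new_product > max_n: break; generate(…)"
def aForLoop (N : Int) (k : Nat) (product : Int) : List Int → PySem.Set Int → PySem.Set Int
  | [], s => s
  | f :: rest, s =>
    if N < product * f then s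
    else aForLoop N k product rest (agen N k (product * f) (f + 1) s)
  termination_by fs => (k, fs.length + 1)
end

-- "for k in range(2, max_k+1): … if min_val > max_n: break; k_interesting[k] = sorted(generate set)"
def aOuter (N : Int) : List Int → List (List Int) → List (List Int)
  | [], acc => acc
  | k :: rest, acc =>
    if N < aMinVal k.toNat 2 1 then acc
    else aOuter N rest
      (PySem.List.pySetD acc k
        (PySem.List.sorted (agen N k.toNat 1 2 PySem.Set.empty) (fun x => x) false))

def precompute_k_interesting (max_n : Int) (max_k : Int) : List (List Int) :=
  let ki := List.replicate (max_k + 1).toNat ([] : List Int)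
  let ki := PySem.List.pySetD ki 1 (PySem.List.pyRange 2 (max_n + 1) 1)
  aOuter max_n (PySem.List.pyRange 2 (max_k + 1) 1) ki

-- ===== PORT B =====
-- "for p, mf in frontier: for f in range(mf, max_n//p + 1): next_frontier.append((p*f, f+1))"
def bExpand (N : Int) (frontier : List (Int × Int)) : List (Int × Int) :=
  frontier.flatMap (fun pm =>
    (PySem.List.pyRange pm.2 (PySem.Int.floordiv N pm.1 + 1) 1).map (fun f => (pm.1 * f, f + 1)))

-- "for k in range(2, max_k+1): expand; if empty: break; res[k] = sorted(set of products)"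
def bLoop (N : Int) : List Int → List (Int × Int) → List (List Int) → List (List Int)
  | [], _, acc => acc
  | k :: rest, frontier, acc =>
    let nxt := bExpand N frontier
    if nxt.isEmpty then acc
    else bLoop N rest nxt
      (PySem.List.pySetD acc k
        (PySem.List.sorted (PySem.Set.ofList (nxt.map Prod.fst)) (fun x => x) false))

def precompute_k_interesting_alt (max_n : Int) (max_k : Int) : List (List Int) :=
  let res := List.replicate (max_k + 1).toNat ([] : List Int)
  let res := PySem.List.pySetD res 1 (PySem.List.pyRange 2 (max_n + 1) 1)
  bLoop max_n (PySem.List.pyRange 2 (max_k + 1) 1)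
    ((PySem.List.pyRange 2 (max_n + 1) 1).map (fun f => (f, f + 1))) res

-- ===== PRECONDITION & SPEC =====
-- Pre_ excludes exactly max_k < 1, where Python A raises IndexError on `k_interesting[1] = …`.
def Pre_precompute_k_interesting (max_n : Int) (max_k : Int) : Prop := 1 ≤ max_k
instance (max_n : Int) (max_k : Int) : Decidable (Pre_precompute_k_interesting max_n max_k) := by unfold Pre_precompute_k_interesting; infer_instance
def pvWitness_precompute_k_interesting : Int × Int := (30, 4)

def Spec_precompute_k_interesting (max_n : Int) (max_k : Int) (out : List (List Int)) : Prop := out = precompute_k_interesting_alt max_n max_k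
instance (max_n : Int) (max_k : Int) (out : List (List Int)) : Decidable (Spec_precompute_k_interesting max_n max_k out) := by unfold Spec_precompute_k_interesting; infer_instance

-- ===== CLAIM (what is proved, stated in full; the proofs are below) =====
def Claim_equal_precompute_k_interesting : Prop := ∀ (max_n : Int) (max_k : Int), Dom_precompute_k_interesting max_n max_k → Pre_precompute_k_interesting max_n max_k → Spec_precompute_k_interesting max_n max_k (precompute_k_interesting max_n max_k)

-- ===== LEMMAS AND PROOFS =====

-- m is reachable from state (p, mf) by exactly k further factor choices, each step's product ≤ N
inductive PExt (N : Int) : Nat → Int → Int → Int → Prop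
  | zero (p mf : Int) : PExt N 0 p mf p
  | succ {k : Nat} {p mf m : Int} (f : Int) (hmf : mf ≤ f) (hle : p * f ≤ N) (h : PExt N k (p * f) (f + 1) m) : PExt N (k + 1) p mf m

-- state (p, mf) is reachable from (1, 2) in j factor choices
inductive PSt (N : Int) : Nat → Int → Int → Prop
  | zero : PSt N 0 1 2
  | succ {j : Nat} {p mf : Int} (f : Int) (h : PSt N j p mf) (hmf : mf ≤ f) (hle : p * f ≤ N) : PSt N (j + 1) (p * f) (f + 1)

-- product of k consecutive integers starting at c
def consec (c : Int) : Nat → Int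
  | 0 => 1
  | k+1 => c * consec (c + 1) k

theorem aMinVal_eq_consec (k : Nat) : ∀ (c acc : Int), aMinVal k c acc = acc * consec c k := by
  induction k with
  | zero => intro c acc; simp [aMinVal, consec]
  | succ k ih => intro c acc; simp [aMinVal, consec, ih, mul_assoc]

theorem consec_pos {c : Int} (hc : 1 ≤ c) (k : Nat) : 0 < consec c k := by
  induction k generalizing c with
  | zero => simp [consec]
  | succ k ih => simpa [consec] using mul_pos (by omega) (ih (by omega))

theorem consec_mono {c d : Int} (hc : 1 ≤ c) (hcd : c ≤ d) (k : Nat) : consec c k ≤ consec d k := by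
  induction k generalizing c d with
  | zero => simp [consec]
  | succ k ih =>
    simp only [consec]
    have h1 : consec (c + 1) k ≤ consec (d + 1) k := ih (by omega) (by omega)
    have h2 : 0 < consec (c + 1) k := consec_pos (by omega) k
    nlinarith [consec_pos (show (1:Int) ≤ d + 1 by omega) k]

theorem one_le_consec {c : Int} (hc : 1 ≤ c) (k : Nat) : 1 ≤ consec c k :=
  consec_pos hc k

-- any PExt-reachable value is at least p * consec mf k
theorem ext_lower {N : Int} : ∀ {k p mf m}, PExt N k p mf m → 0 < p → 2 ≤ mf → p * consec mf k ≤ m := by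
  intro k p mf m h
  induction h with
  | zero p mf => intro _ _; simp [consec]
  | @succ k p mf m f hf hle h ih =>
    intro hp hmf
    have hpf : 0 < p * f := by nlinarith
    have ihx := ih hpf (by omega)
    have h1 : consec (mf + 1) k ≤ consec (f + 1) k := consec_mono (by omega) (by omega) k
    have h2 : 0 < consec (mf + 1) k := consec_pos (by omega) k
    have h3 : 0 < consec (f + 1) k := consec_pos (by omega) k
    have hstep : p * consec mf (k + 1) = p * (mf * consec (mf + 1) k) := rfl
    rw [hstep]
    have ha : mf * consec (mf + 1) k ≤ f * consec (f + 1) k := by nlinarith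
    have hb : p * (mf * consec (mf + 1) k) ≤ p * (f * consec (f + 1) k) :=
      mul_le_mul_of_nonneg_left ha (le_of_lt hp)
    nlinarith [hb, ihx]

-- PExt values stay ≤ N when the start product is ≤ N
theorem ext_le {N : Int} : ∀ {k p mf m}, PExt N k p mf m → p ≤ N → m ≤ N := by
  intro k p mf m h
  induction h with
  | zero => exact fun hp => hp
  | @succ k p mf m f hf hle h ih => exact fun _ => ih hle

theorem pext_zero_iff {N p mf m : Int} : PExt N 0 p mf m ↔ m = p := by
  constructor
  · intro h; cases h; rfl
  · intro h; subst h; exact PExt.zero _ _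

-- the prune check is sound: if it fires, even the full consecutive product overshoots N
theorem aMinChk_sound {N p : Int} : ∀ (k : Nat) (c mrp : Int), 0 < p → 1 ≤ c → 0 < mrp →
    aMinChk N p k c mrp = true → N < p * (mrp * consec c k) := by
  intro k
  induction k with
  | zero => intro c mrp _ _ _ h; simp [aMinChk] at h
  | succ k ih =>
    intro c mrp hp hc hmrp h
    simp only [aMinChk] at h
    split at h
    · rename_i hlt
      have h1 : 1 ≤ consec (c + 1) k := one_le_consec (by omega) k
      have : p * (mrp * c) * 1 ≤ p * (mrp * c) * consec (c + 1) k := by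
        have : 0 < p * (mrp * c) := by positivity
        nlinarith
      calc N < p * (mrp * c) := hlt
        _ ≤ p * (mrp * c) * consec (c + 1) k := by simpa using this
        _ = p * (mrp * consec c (k + 1)) := by rw [show consec c (k+1) = c * consec (c+1) k from rfl]; ring
    · have := ih (c + 1) (mrp * c) hp (by omega) (by positivity) h
      calc N < p * (mrp * c * consec (c + 1) k) := this
        _ = p * (mrp * consec c (k + 1)) := by rw [show consec c (k+1) = c * consec (c+1) k from rfl]; ring

-- membership characterisation of A's generate
theorem mem_agen {N : Int} : ∀ (k : Nat) (p mf : Int) (s : PySem.Set Int) (m : Int),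
    0 < p → p ≤ N → 2 ≤ mf →
    (m ∈ agen N k p mf s ↔ m ∈ s ∨ PExt N k p mf m) := by
  intro k
  induction k with
  | zero =>
    intro p mf s m hp hN hmf
    rw [agen]
    simp [PySem.Set.mem_add, pext_zero_iff]
  | succ k ih =>
    intro p mf s m hp hN hmf
    rw [agen]
    by_cases hchk : aMinChk N p (k + 1) mf 1 = true
    · rw [if_pos hchk]
      have hno : ¬ PExt N (k + 1) p mf m := by
        intro h
        have hlow := ext_lower h hp hmf
        have hmle : m ≤ N := by
          cases h with
          | succ f hf hle h' => exact ext_le h' hle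
        have hc := aMinChk_sound (k + 1) mf 1 hp (by omega) one_pos hchk
        rw [one_mul] at hc
        omega
      tauto
    · rw [if_neg hchk]
      have hfor : ∀ (fs : List Int) (s : PySem.Set Int), (∀ f ∈ fs, 2 ≤ f ∧ p * f ≤ N) →
          (m ∈ aForLoop N k p fs s ↔ m ∈ s ∨ ∃ f ∈ fs, PExt N k (p * f) (f + 1) m) := by
        intro fs
        induction fs with
        | nil => intro s _; rw [aForLoop]; simp
        | cons f rest ihf =>
          intro s hall
          obtain ⟨hf2, hfN⟩ := hall f (by simp)
          rw [aForLoop, if_neg (not_lt.mpr hfN)]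
          rw [ihf _ (fun g hg => hall g (by simp [hg]))]
          rw [ih (p * f) (f + 1) s m (by nlinarith) hfN (by omega)]
          simp only [List.exists_mem_cons_iff]
          tauto
      rw [hfor _ s (fun f hf => by
        rw [PySem.List.mem_pyRange_one] at hf
        have hfd : f ≤ PySem.Int.floordiv N p := by omega
        rw [PySem.Int.le_floordiv_iff_mul_le hp] at hfd
        exact ⟨by omega, by linarith [hfd, mul_comm f p]⟩)]
      constructor
      · rintro (hs | ⟨f, hfmem, hext⟩)
        · exact Or.inl hs
        · rw [PySem.List.mem_pyRange_one] at hfmem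
          have hfd : f ≤ PySem.Int.floordiv N p := by omega
          rw [PySem.Int.le_floordiv_iff_mul_le hp] at hfd
          exact Or.inr (PExt.succ f hfmem.1 (by linarith [mul_comm f p]) hext)
      · rintro (hs | h)
        · exact Or.inl hs
        · cases h with
          | succ f hf hle h' =>
            refine Or.inr ⟨f, ?_, h'⟩
            rw [PySem.List.mem_pyRange_one]
            have : f ≤ PySem.Int.floordiv N p := by
              rw [PySem.Int.le_floordiv_iff_mul_le hp]
              linarith [mul_comm f p]
            omega

theorem nodup_agen {N : Int} : ∀ (k : Nat) (p mf : Int) (s : PySem.Set Int),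
    s.Nodup → (agen N k p mf s).Nodup := by
  intro k
  induction k with
  | zero => intro p mf s hs; rw [agen]; exact PySem.Set.nodup_add _ _ hs
  | succ k ih =>
    intro p mf s hs
    rw [agen]
    by_cases hchk : aMinChk N p (k + 1) mf 1 = true
    · rw [if_pos hchk]; exact hs
    · rw [if_neg hchk]
      have hfor : ∀ (fs : List Int) (s : PySem.Set Int), s.Nodup → (aForLoop N k p fs s).Nodup := by
        intro fs
        induction fs with
        | nil => intro s hs; rw [aForLoop]; exact hs
        | cons f rest ihf =>
          intro s hs
          rw [aForLoop]
          split
          · exact hs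
          · exact ihf _ (ih _ _ _ hs)
      exact hfor _ s hs

-- PSt invariants
theorem st_pos {N : Int} : ∀ {j p mf}, PSt N j p mf → 0 < p ∧ 2 ≤ mf := by
  intro j p mf h
  induction h with
  | zero => omega
  | @succ j p mf f h hf hle ih => exact ⟨by nlinarith [ih.1, ih.2], by omega⟩

-- one expansion step preserves the frontier invariant
theorem bExpand_invariant {N : Int} {j : Nat} {frontier : List (Int × Int)}
    (hinv : ∀ pm : Int × Int, pm ∈ frontier ↔ PSt N j pm.1 pm.2) :
    ∀ qm : Int × Int, qm ∈ bExpand N frontier ↔ PSt N (j + 1) qm.1 qm.2 := by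
  rintro ⟨q, qmf⟩
  simp only [bExpand, List.mem_flatMap, List.mem_map]
  constructor
  · rintro ⟨⟨p, mf⟩, hpm, f, hfmem, hq⟩
    dsimp only at hfmem hq
    have hst : PSt N j p mf := (hinv (p, mf)).mp hpm
    have hp : 0 < p := (st_pos hst).1
    rw [PySem.List.mem_pyRange_one] at hfmem
    have hfd : f ≤ PySem.Int.floordiv N p := by omega
    rw [PySem.Int.le_floordiv_iff_mul_le hp] at hfd
    cases hq
    exact PSt.succ f hst hfmem.1 (by linarith [mul_comm f p])
  · intro hst
    cases hst with
    | @succ j p mf f h hmf hle =>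
      have hp : 0 < p := (st_pos h).1
      refine ⟨(p, mf), (hinv (p, mf)).mpr h, f, ?_, rfl⟩
      dsimp only
      rw [PySem.List.mem_pyRange_one]
      have : f ≤ PySem.Int.floordiv N p := by
        rw [PySem.Int.le_floordiv_iff_mul_le hp]
        linarith [mul_comm f p]
      omega

-- bridge: products reachable as a frontier state = PExt-reachable from (1,2)
theorem st_pext {N : Int} : ∀ {j p mf}, PSt N j p mf → ∀ (k : Nat) (m : Int), PExt N k p mf m → PExt N (j + k) 1 2 m := by
  intro j p mf h
  induction h with
  | zero => intro k m h'; simpa using h'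
  | @succ j p mf f h hmf hle ih =>
    intro k m h'
    have := ih (k + 1) m (PExt.succ f hmf hle h')
    rwa [show j + (k + 1) = j + 1 + k by omega] at this

theorem pext_st {N : Int} : ∀ {k p mf m}, PExt N k p mf m → ∀ {j : Nat}, PSt N j p mf → ∃ mf', PSt N (j + k) m mf' := by
  intro k p mf m h
  induction h with
  | zero p mf => intro j hst; exact ⟨mf, by simpa using hst⟩
  | @succ k p mf m f hmf hle h ih =>
    intro j hst
    obtain ⟨mf', h'⟩ := ih (PSt.succ f hst hmf hle)
    exact ⟨mf', by rwa [show j + 1 + k = j + (k + 1) by omega] at h'⟩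

theorem st_ext_iff {N : Int} (j : Nat) (m : Int) :
    (∃ mf, PSt N j m mf) ↔ PExt N j 1 2 m := by
  constructor
  · rintro ⟨mf, h⟩
    have := st_pext h 0 m (PExt.zero m mf)
    simpa using this
  · intro h
    have := pext_st h PSt.zero
    simpa using this

-- the consecutive chain realises consec 2 k when it fits under N
theorem ext_consec {N : Int} : ∀ (k : Nat) (p c : Int), 0 < p → 2 ≤ c →
    p * consec c k ≤ N → PExt N k p c (p * consec c k) := by
  intro k
  induction k with
  | zero =>
    intro p c hp hc _
    rw [show consec c 0 = 1 from rfl, mul_one]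
    exact PExt.zero p c
  | succ k ih =>
    intro p c hp hc hle
    have hassoc : p * consec c (k + 1) = p * c * consec (c + 1) k := by
      rw [show consec c (k + 1) = c * consec (c + 1) k from rfl]; ring
    have hpc : 0 < p * c := by nlinarith
    have h1 : 1 ≤ consec (c + 1) k := one_le_consec (by omega) k
    have hpcN : p * c ≤ N := by nlinarith [hassoc ▸ hle]
    have hrec := ih (p * c) (c + 1) hpc (by omega) (by rw [← hassoc]; exact hle)
    rw [hassoc]
    exact PExt.succ c le_rfl hpcN hrec

-- the two recorded level-k lists coincide
theorem sorted_values_eq {N : Int} {k : Nat} (hN : 1 ≤ N) {nxt : List (Int × Int)}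
    (hinv : ∀ pm : Int × Int, pm ∈ nxt ↔ PSt N k pm.1 pm.2) :
    PySem.List.sorted (agen N k 1 2 PySem.Set.empty) (fun x => x) false =
    PySem.List.sorted (PySem.Set.ofList (nxt.map Prod.fst)) (fun x => x) false := by
  apply PySem.List.sorted_eq_sorted_of_perm _ _ _ Function.injective_id
  rw [List.perm_ext_iff_of_nodup (nodup_agen k 1 2 PySem.Set.empty List.nodup_nil) (PySem.Set.nodup_ofList _)]
  intro a
  rw [mem_agen k 1 2 PySem.Set.empty a one_pos hN le_rfl]
  rw [PySem.Set.mem_ofList]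
  simp only [List.mem_map]
  constructor
  · rintro (h | h)
    · simp [PySem.Set.empty] at h
    · obtain ⟨mf, hst⟩ := (st_ext_iff k a).mpr h
      exact ⟨(a, mf), (hinv (a, mf)).mpr hst, rfl⟩
  · rintro ⟨pm, hpm, rfl⟩
    exact Or.inr ((st_ext_iff k pm.1).mp ⟨pm.2, (hinv pm).mp hpm⟩)

-- main loop equivalence
theorem loop_eq (N stop : Int) : ∀ (n : Nat) (j : Int) (frontier : List (Int × Int)) (acc : List (List Int)),
    (stop - j).toNat ≤ n → 2 ≤ j →
    (∀ pm : Int × Int, pm ∈ frontier ↔ PSt N (j - 1).toNat pm.1 pm.2) →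
    aOuter N (PySem.List.pyRange j stop 1) acc = bLoop N (PySem.List.pyRange j stop 1) frontier acc := by
  intro n
  induction n with
  | zero =>
    intro j frontier acc hn hj _
    rw [PySem.List.pyRange_one_eq_nil (by omega)]
    simp [aOuter, bLoop]
  | succ n ih =>
    intro j frontier acc hn hj hinv
    by_cases hjs : j < stop
    · rw [PySem.List.pyRange_one_cons hjs]
      have hjt : (j - 1).toNat + 1 = j.toNat := by omega
      have hinv' : ∀ qm : Int × Int, qm ∈ bExpand N frontier ↔ PSt N j.toNat qm.1 qm.2 := by
        intro qm; rw [← hjt]; exact bExpand_invariant hinv qm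
      have hmv : aMinVal j.toNat 2 1 = consec 2 j.toNat := by
        rw [aMinVal_eq_consec]; ring
      by_cases hbr : N < consec 2 j.toNat
      · have hempty : bExpand N frontier = [] := by
          rcases hx : bExpand N frontier with _ | ⟨q, t⟩
          · rfl
          · exfalso
            obtain ⟨q1, q2⟩ := q
            have hq : PSt N j.toNat q1 q2 := by
              have := (hinv' (q1, q2)).mp (by rw [hx]; exact List.mem_cons_self ..)
              exact this
            have hqext : PExt N j.toNat 1 2 q1 := (st_ext_iff _ _).mp ⟨q2, hq⟩
            have hlow := ext_lower hqext one_pos le_rfl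
            rw [one_mul] at hlow
            obtain ⟨jn, hjn⟩ : ∃ jn, j.toNat = jn + 1 := ⟨j.toNat - 1, by omega⟩
            rw [hjn] at hq
            cases hq with
            | succ f h hmf hle => omega
        have hA : aOuter N (j :: PySem.List.pyRange (j + 1) stop 1) acc = acc := by
          rw [aOuter, hmv, if_pos hbr]
        have hB : bLoop N (j :: PySem.List.pyRange (j + 1) stop 1) frontier acc = acc := by
          rw [bLoop]
          simp only [hempty, List.isEmpty_nil, if_pos]
        rw [hA, hB]
      · have hNge : consec 2 j.toNat ≤ N := not_lt.mp hbr
        have h1N : (1 : Int) ≤ N := le_trans (one_le_consec (by omega) j.toNat) hNge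
        have hwit : PExt N j.toNat 1 2 (1 * consec 2 j.toNat) :=
          ext_consec _ 1 2 one_pos le_rfl (by rwa [one_mul])
        obtain ⟨mf', hst'⟩ := (st_ext_iff j.toNat (1 * consec 2 j.toNat)).mpr hwit
        have hmem := (hinv' (1 * consec 2 j.toNat, mf')).mpr hst'
        have hne : ¬ (bExpand N frontier).isEmpty := by
          intro h
          rw [List.isEmpty_iff] at h
          rw [h] at hmem
          simp at hmem
        have hvals := sorted_values_eq (N := N) (k := j.toNat) h1N hinv'
        rw [aOuter, bLoop, hmv, if_neg (not_lt.mpr hNge), if_neg hne, hvals]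
        exact ih (j + 1) (bExpand N frontier) _ (by omega) (by omega)
          (fun pm => by rw [show (j + 1 - 1).toNat = j.toNat by omega]; exact hinv' pm)
    · rw [PySem.List.pyRange_one_eq_nil (by omega)]
      simp [aOuter, bLoop]

-- ===== VERDICT (by name: the statement is the Claim_ definition above) =====
theorem init_frontier_invariant (N : Int) :
    ∀ pm : Int × Int, pm ∈ (PySem.List.pyRange 2 (N + 1) 1).map (fun f => (f, f + 1)) ↔ PSt N 1 pm.1 pm.2 := by
  rintro ⟨a, b⟩
  simp only [List.mem_map, PySem.List.mem_pyRange_one]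
  constructor
  · rintro ⟨f, ⟨h2, hlt⟩, hq⟩
    cases hq
    have := PSt.succ a PSt.zero h2 (show 1 * a ≤ N by rw [one_mul]; omega)
    rwa [one_mul] at this
  · intro h
    cases h with
    | succ f h0 hmf hle =>
      cases h0
      rw [one_mul] at hle ⊢
      exact ⟨f, ⟨hmf, by omega⟩, rfl⟩

theorem precompute_k_interesting_spec : Claim_equal_precompute_k_interesting := by
  intro N K hdom hpre
  unfold Spec_precompute_k_interesting precompute_k_interesting precompute_k_interesting_alt
  refine loop_eq N (K + 1) (K + 1 - 2).toNat 2 _ _ le_rfl (by omega) ?_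
  intro pm
  rw [show ((2 : Int) - 1).toNat = 1 by decide]
  exact init_frontier_invariant N pm
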